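-- pv_equiv track=rewrite | github.com/infarna/simplifiedDBinDict | stage2.py | solution
-- ===== SOURCE A (Python) =====
-- def solution(queries):
--     db = {}  # In-memory database to store records
--     results = []
--
--     def set_value(timestamp, key, field, value):
--         if key not in db:
--             db[key] = {}
--         db[key][field] = value
--         return ""
--
--     def compare_and_set(timestamp, key, field, expected_value, new_value):
--         if key in db and field in db[key] and str(db[key][field]) == expected_value:
--             db[key][field] = new_value
--             return "true"
--         return "false"
--
--     def get_value(timestamp, key, field):
--         if key in db and field in db[key]:
--             return str(db[key][field])
--         return ""
--
--     def compare_and_delete(timestamp, key, field, expected_value):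
--         if key in db and field in db[key] and str(db[key][field]) == expected_value:
--             del db[key][field]
--             return "true"
--         return "false"
--
--     def scan(timestamp, key):
--         if key not in db or not db[key]:
--             return ""
--         fields = db[key]
--         sorted_fields = sorted(fields.items())  # Sort by field name
--         return ", ".join([f"{field}({value})" for field, value in sorted_fields])
--
--     def scan_by_prefix(timestamp, key, prefix):
--         if key not in db or not db[key]:
--             return ""
--         fields = db[key]
--         filtered_fields = {field: value for field, value in fields.items() if field.startswith(prefix)}
--         sorted_filtered_fields = sorted(filtered_fields.items())  # Sort by field name
--         return ", ".join([f"{field}({value})" for field, value in sorted_filtered_fields])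
--
--     # Parse and execute each query
--     for query in queries:
--         operation, timestamp, key, *params = query
--         if operation == "SET":
--             result = set_value(timestamp, key, params[0], params[1])  # Keep value as string
--         elif operation == "COMPARE_AND_SET":
--             result = compare_and_set(timestamp, key, params[0], params[1], params[2])
--         elif operation == "GET":
--             result = get_value(timestamp, key, params[0])
--         elif operation == "COMPARE_AND_DELETE":
--             result = compare_and_delete(timestamp, key, params[0], params[1])
--         elif operation == "SCAN":
--             result = scan(timestamp, key)
--         elif operation == "SCAN_BY_PREFIX":
--             result = scan_by_prefix(timestamp, key, params[0])
--         else: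
--             result = "Invalid operation"
--         results.append(result)
--
--     return results
-- ===== SOURCE B (Python) =====
-- def solution(queries):
--     # Store is a single flat list of ((key, field), value) records kept sorted by
--     # (key, field); point ops locate by linear probe into the sorted list, and the
--     # SCANs become a filter over the already-sorted store with no sort at query time.
--     store = []
--
--     def locate(kf):
--         i = 0
--         while i < len(store) and store[i][0] < kf:
--             i += 1
--         return i, (i < len(store) and store[i][0] == kf)
--
--     def render(key, pred):
--         return ", ".join(f"{f}({v})" for (k, f), v in store if k == key and pred(f))
--
--     out = []
--     for operation, timestamp, key, *params in queries:
--         if operation == "SET":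
--             i, found = locate((key, params[0]))
--             if found:
--                 store[i] = ((key, params[0]), params[1])
--             else:
--                 store.insert(i, ((key, params[0]), params[1]))
--             out.append("")
--         elif operation == "COMPARE_AND_SET":
--             i, found = locate((key, params[0]))
--             if found and str(store[i][1]) == params[1]:
--                 store[i] = (store[i][0], params[2])
--                 out.append("true")
--             else:
--                 out.append("false")
--         elif operation == "GET":
--             i, found = locate((key, params[0]))
--             out.append(str(store[i][1]) if found else "")
--         elif operation == "COMPARE_AND_DELETE":
--             i, found = locate((key, params[0]))
--             if found and str(store[i][1]) == params[1]:
--                 del store[i]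
--                 out.append("true")
--             else:
--                 out.append("false")
--         elif operation == "SCAN":
--             out.append(render(key, lambda f: True))
--         elif operation == "SCAN_BY_PREFIX":
--             p = params[0]
--             out.append(render(key, lambda f: f.startswith(p)))
--         else:
--             out.append("Invalid operation")
--     return out
-- ===== Notes on version B (the rewrite author's own statement) =====
-- stated objective: alternative
-- what changed: The nested dict-of-dicts is replaced by one flat list of ((key,field),value) records kept sorted by (key,field): point operations locate their slot by a probe into the sorted list and mutate it in place, and SCAN/SCAN_BY_PREFIX become a plain filter over the already-sorted store with no sorting at query time.
import Mathlib
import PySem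

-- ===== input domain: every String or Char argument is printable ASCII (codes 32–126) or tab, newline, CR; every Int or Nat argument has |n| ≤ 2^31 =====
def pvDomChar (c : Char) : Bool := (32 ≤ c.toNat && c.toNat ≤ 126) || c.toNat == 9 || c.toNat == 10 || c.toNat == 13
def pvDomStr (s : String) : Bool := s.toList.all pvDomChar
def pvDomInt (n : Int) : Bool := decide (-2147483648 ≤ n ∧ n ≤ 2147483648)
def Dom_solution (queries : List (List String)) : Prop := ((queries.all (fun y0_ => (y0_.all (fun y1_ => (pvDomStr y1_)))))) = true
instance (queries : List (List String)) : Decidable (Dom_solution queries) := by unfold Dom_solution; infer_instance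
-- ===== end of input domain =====

-- B replaces A's nested dict-of-dicts by ONE flat list of ((key, field), value) records kept
-- sorted by (key, field): point ops locate their slot by a probe into the sorted list and mutate
-- it in place, and the SCANs become a plain filter with no sort at query time (objective: alternative).

-- ===== PORT A =====
-- ", ".join(f"{field}({value})" for field, value in pairs) — A's join expression
def pvJoinFields (pairs : List (String × String)) : String :=
  PySem.Str.join ", " (pairs.map (fun p => p.1 ++ "(" ++ p.2 ++ ")"))

-- One iteration of A's query loop: the nested db and the single appended result.
-- str(...) on the stored values is the identity: every stored value is a string from the query list.
-- 'del db[key][field]' / 'db[key][field] = v' mutate the inner dict in place: ported as re-inserting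
-- the updated inner dict at key (Dict.insert overwrites keeping the key's position).
def solutionStep (db : PySem.Dict String (PySem.Dict String String)) (q : List String) :
    PySem.Dict String (PySem.Dict String String) × String :=
  let op := PySem.List.pyGetD q 0 ""          -- operation, timestamp, key, *params = query (Pre_ gives length ≥ 3)
  let key := PySem.List.pyGetD q 2 ""
  let params := q.drop 3
  if op == "SET" then
    let db1 := if db.contains key then db else db.insert key PySem.Dict.empty
    (db1.insert key ((db1.getD key PySem.Dict.empty).insert
        (PySem.List.pyGetD params 0 "") (PySem.List.pyGetD params 1 "")), "")
  else if op == "COMPARE_AND_SET" then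
    let fld := PySem.List.pyGetD params 0 ""
    let inner := db.getD key PySem.Dict.empty
    if db.contains key && inner.contains fld && (inner.getD fld "" == PySem.List.pyGetD params 1 "") then
      (db.insert key (inner.insert fld (PySem.List.pyGetD params 2 "")), "true")
    else (db, "false")
  else if op == "GET" then
    let fld := PySem.List.pyGetD params 0 ""
    let inner := db.getD key PySem.Dict.empty
    (db, if db.contains key && inner.contains fld then inner.getD fld "" else "")
  else if op == "COMPARE_AND_DELETE" then
    let fld := PySem.List.pyGetD params 0 ""
    let inner := db.getD key PySem.Dict.empty
    if db.contains key && inner.contains fld && (inner.getD fld "" == PySem.List.pyGetD params 1 "") then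
      (db.insert key (inner.erase fld), "true")
    else (db, "false")
  else if op == "SCAN" then
    let inner := db.getD key PySem.Dict.empty
    (db, if !db.contains key || inner.items.isEmpty then ""
         else pvJoinFields (PySem.List.sorted2 inner.items Prod.fst Prod.snd))
  else if op == "SCAN_BY_PREFIX" then
    let pre := PySem.List.pyGetD params 0 ""
    let inner := db.getD key PySem.Dict.empty
    -- the dict comprehension over inner's (distinct-field) items followed by .items() is the filter of items
    (db, if !db.contains key || inner.items.isEmpty then ""
         else pvJoinFields (PySem.List.sorted2
                (inner.items.filter (fun p => PySem.Str.startswith p.1 pre)) Prod.fst Prod.snd))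
  else (db, "Invalid operation")

def solution (queries : List (List String)) : List String :=
  (queries.foldl (fun st q =>
      let r := solutionStep st.1 q
      (r.1, st.2 ++ [r.2]))
    (PySem.Dict.empty, [])).2

-- ===== PORT B =====
-- Python's tuple-of-strings '<' on the (key, field) record keys
def pvKfLt (a b : String × String) : Bool :=
  decide (a.1 < b.1) || (a.1 == b.1 && decide (a.2 < b.2))

-- 'while i < len(store) and store[i][0] < kf: i += 1' plus the found test, as structural recursion
def pvLocate (store : List ((String × String) × String)) (kf : String × String) : Nat × Bool :=
  match store with
  | [] => (0, false)
  | e :: rest =>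
    if pvKfLt e.1 kf then
      let r := pvLocate rest kf
      (r.1 + 1, r.2)
    else (0, e.1 == kf)

-- ", ".join(f"{f}({v})" for (k, f), v in store if k == key and pred(f))
def pvRender (store : List ((String × String) × String)) (key : String) (pred : String → Bool) : String :=
  PySem.Str.join ", " ((store.filter (fun e => e.1.1 == key && pred e.1.2)).map
    (fun e => e.1.2 ++ "(" ++ e.2 ++ ")"))

-- One iteration of B's loop on the sorted flat store.  store[i] is read with List.getD
-- (the found flag guarantees the index is in range).
def solutionAltStep (store : List ((String × String) × String)) (q : List String) :
    List ((String × String) × String) × String :=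
  let op := PySem.List.pyGetD q 0 ""
  let key := PySem.List.pyGetD q 2 ""
  let params := q.drop 3
  if op == "SET" then
    let kf := (key, PySem.List.pyGetD params 0 "")
    let r := pvLocate store kf
    (if r.2 then store.set r.1 (kf, PySem.List.pyGetD params 1 "")
     else store.insertIdx r.1 (kf, PySem.List.pyGetD params 1 ""), "")
  else if op == "COMPARE_AND_SET" then
    let kf := (key, PySem.List.pyGetD params 0 "")
    let r := pvLocate store kf
    if r.2 && ((store.getD r.1 (("", ""), "")).2 == PySem.List.pyGetD params 1 "") then
      (store.set r.1 ((store.getD r.1 (("", ""), "")).1, PySem.List.pyGetD params 2 ""), "true")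
    else (store, "false")
  else if op == "GET" then
    let r := pvLocate store (key, PySem.List.pyGetD params 0 "")
    (store, if r.2 then (store.getD r.1 (("", ""), "")).2 else "")
  else if op == "COMPARE_AND_DELETE" then
    let r := pvLocate store (key, PySem.List.pyGetD params 0 "")
    if r.2 && ((store.getD r.1 (("", ""), "")).2 == PySem.List.pyGetD params 1 "") then
      (store.eraseIdx r.1, "true")
    else (store, "false")
  else if op == "SCAN" then
    (store, pvRender store key (fun _ => true))
  else if op == "SCAN_BY_PREFIX" then
    let pre := PySem.List.pyGetD params 0 ""
    (store, pvRender store key (fun f => PySem.Str.startswith f pre))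
  else (store, "Invalid operation")

-- 'for … in queries: … out.append(result)' as the obvious structural recursion threading the store
def solutionAltGo (store : List ((String × String) × String)) :
    List (List String) → List String
  | [] => []
  | q :: qs =>
    let r := solutionAltStep store q
    r.2 :: solutionAltGo r.1 qs

def solution_alt (queries : List (List String)) : List String :=
  solutionAltGo [] queries

-- ===== PRECONDITION & SPEC =====
-- How many entries a query needs so that A neither fails to unpack (< 3) nor hits an IndexError on params[i].
def pvNeedLen (op : String) : Nat :=
  if op = "SET" then 5
  else if op = "COMPARE_AND_SET" then 6
  else if op = "GET" then 4
  else if op = "COMPARE_AND_DELETE" then 5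
  else if op = "SCAN_BY_PREFIX" then 4
  else 3

-- Excludes exactly the inputs where A raises: a query shorter than 3 (unpacking ValueError) or
-- shorter than its operation's required arity (IndexError on params[i]).
def Pre_solution (queries : List (List String)) : Prop :=
  ∀ q ∈ queries, pvNeedLen (q.getD 0 "") ≤ q.length

instance (queries : List (List String)) : Decidable (Pre_solution queries) := by
  unfold Pre_solution; infer_instance

def pvWitness_solution : List (List String) :=
  [["SET", "1", "k", "f", "v"], ["GET", "2", "k", "f"], ["SCAN", "3", "k"],
   ["COMPARE_AND_DELETE", "4", "k", "f", "v"], ["SCAN_BY_PREFIX", "5", "k", ""]]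

def Spec_solution (queries : List (List String)) (out : List String) : Prop := out = solution_alt queries
instance (queries : List (List String)) (out : List String) : Decidable (Spec_solution queries out) := by
  unfold Spec_solution; infer_instance

-- ===== CLAIM (what is proved, stated in full; the proofs are below) =====
def Claim_equal_solution : Prop := ∀ (queries : List (List String)), Dom_solution queries → Pre_solution queries → Spec_solution queries (solution queries)

-- ===== LEMMAS AND PROOFS =====

-- Prop version of the record-key order
def pvOrd (a b : String × String) : Prop := a.1 < b.1 ∨ (a.1 = b.1 ∧ a.2 < b.2)

theorem pvKfLt_iff (a b : String × String) : pvKfLt a b = true ↔ pvOrd a b := by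
  simp [pvKfLt, pvOrd]

theorem pvOrd_irrefl (a b : String × String) (h : pvOrd a b) : a ≠ b := by
  rintro rfl
  rcases h with h | ⟨_, h⟩ <;> exact lt_irrefl _ h

theorem pvOrd_trans {a b c : String × String} (h1 : pvOrd a b) (h2 : pvOrd b c) : pvOrd a c := by
  rcases h1 with h1 | ⟨e1, h1⟩ <;> rcases h2 with h2 | ⟨e2, h2⟩
  · exact Or.inl (lt_trans h1 h2)
  · exact Or.inl (e2 ▸ h1)
  · exact Or.inl (e1 ▸ h2)
  · exact Or.inr ⟨e1.trans e2, lt_trans h1 h2⟩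

theorem pvOrd_total (a b : String × String) : pvOrd a b ∨ a = b ∨ pvOrd b a := by
  rcases lt_trichotomy a.1 b.1 with h | h | h
  · exact Or.inl (Or.inl h)
  · rcases lt_trichotomy a.2 b.2 with h2 | h2 | h2
    · exact Or.inl (Or.inr ⟨h, h2⟩)
    · exact Or.inr (Or.inl (Prod.ext h h2))
    · exact Or.inr (Or.inr (Or.inr ⟨h.symm, h2⟩))
  · exact Or.inr (Or.inr (Or.inl h))

theorem pvOrd_of_not_lt {a b : String × String} (hlt : ¬ pvKfLt a b = true) (hne : a ≠ b) :
    pvOrd b a := by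
  rcases pvOrd_total a b with h | h | h
  · exact absurd ((pvKfLt_iff _ _).2 h) hlt
  · exact absurd h hne
  · exact h

-- association lookup in the flat store (first match)
def pvLook (store : List ((String × String) × String)) (kf : String × String) : Option String :=
  match store with
  | [] => none
  | e :: rest => if e.1 = kf then some e.2 else pvLook rest kf

-- structural views of B's three in-place mutations of the sorted store
def pvUpsert (kf : String × String) (v : String) :
    List ((String × String) × String) → List ((String × String) × String)
  | [] => [(kf, v)]
  | e :: rest =>
    if pvKfLt e.1 kf then e :: pvUpsert kf v rest
    else if e.1 == kf then (kf, v) :: rest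
    else (kf, v) :: e :: rest

def pvRemove (kf : String × String) :
    List ((String × String) × String) → List ((String × String) × String)
  | [] => []
  | e :: rest =>
    if pvKfLt e.1 kf then e :: pvRemove kf rest
    else if e.1 == kf then rest
    else e :: rest

-- sortedness of the store
def pvSorted (store : List ((String × String) × String)) : Prop :=
  store.Pairwise (fun a b => pvOrd a.1 b.1)

theorem pvLook_eq_none_of_forall (store : List ((String × String) × String))
    (kf : String × String) (h : ∀ e ∈ store, e.1 ≠ kf) : pvLook store kf = none := by
  induction store with
  | nil => rfl
  | cons e rest ih =>
    simp only [pvLook]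
    rw [if_neg (h e (by simp))]
    exact ih (fun x hx => h x (by simp [hx]))

theorem pvLook_eq_none_of_lt {store : List ((String × String) × String)}
    {kf : String × String} {p : String × String}
    (hlt : pvOrd kf p) (hmem : ∀ x ∈ store, pvOrd p x.1) : pvLook store kf = none := by
  apply pvLook_eq_none_of_forall
  intro x hx hxe
  exact pvOrd_irrefl _ _ (pvOrd_trans hlt (hmem x hx)) hxe.symm

-- GET through locate equals association lookup on a sorted store
theorem pvLocate_get (store : List ((String × String) × String)) (kf : String × String)
    (hs : pvSorted store) :
    (if (pvLocate store kf).2 then some ((store.getD (pvLocate store kf).1 (("", ""), "")).2) else none)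
      = pvLook store kf := by
  induction store with
  | nil => rfl
  | cons e rest ih =>
    rcases List.pairwise_cons.1 hs with ⟨hhead, hrest⟩
    simp only [pvLocate, pvLook]
    by_cases hlt : pvKfLt e.1 kf = true
    · have hne : e.1 ≠ kf := fun h => pvOrd_irrefl _ _ ((pvKfLt_iff _ _).1 hlt) h
      rw [if_neg hne]
      simp only [hlt, if_true]
      simpa using ih hrest
    · simp only [hlt, Bool.false_eq_true, if_false]
      by_cases heq : e.1 = kf
      · simp [heq]
      · have hbe : (e.1 == kf) = false := by simp [heq]
        simp only [hbe, Bool.false_eq_true, if_false, if_neg heq]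
        exact (pvLook_eq_none_of_lt (pvOrd_of_not_lt hlt heq) hhead).symm

-- B's SET mutation is pvUpsert (no sortedness needed)
theorem pvLocate_set (store : List ((String × String) × String)) (kf : String × String) (v : String) :
    (if (pvLocate store kf).2 then store.set (pvLocate store kf).1 (kf, v)
     else store.insertIdx (pvLocate store kf).1 (kf, v)) = pvUpsert kf v store := by
  induction store with
  | nil => rfl
  | cons e rest ih =>
    simp only [pvLocate, pvUpsert]
    by_cases hlt : pvKfLt e.1 kf = true
    · simp only [hlt, if_true]
      by_cases hf : (pvLocate rest kf).2 = true
      · simp only [hf, if_true, List.set_cons_succ]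
        rw [← ih]
        simp [hf]
      · simp only [hf, Bool.false_eq_true, if_false, List.insertIdx_succ_cons]
        rw [← ih]
        simp [hf]
    · simp only [hlt, Bool.false_eq_true, if_false]
      by_cases heq : (e.1 == kf) = true
      · simp [heq]
      · simp [heq]

-- B's CAS mutation on a found key is pvUpsert
theorem pvLocate_cas (store : List ((String × String) × String)) (kf : String × String)
    (v w : String) (hs : pvSorted store) (hfound : pvLook store kf = some w) :
    store.set (pvLocate store kf).1 ((store.getD (pvLocate store kf).1 (("", ""), "")).1, v)
      = pvUpsert kf v store := by
  induction store with
  | nil => cases hfound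
  | cons e rest ih =>
    rcases List.pairwise_cons.1 hs with ⟨hhead, hrest⟩
    simp only [pvLook] at hfound
    simp only [pvLocate, pvUpsert]
    by_cases hlt : pvKfLt e.1 kf = true
    · have hne : e.1 ≠ kf := fun h => pvOrd_irrefl _ _ ((pvKfLt_iff _ _).1 hlt) h
      rw [if_neg hne] at hfound
      simp only [hlt, if_true, List.set_cons_succ, List.getD_cons_succ]
      rw [ih hrest hfound]
    · simp only [hlt, Bool.false_eq_true, if_false]
      by_cases heq : e.1 = kf
      · simp [heq]
      · rw [if_neg heq] at hfound
        rw [pvLook_eq_none_of_lt (pvOrd_of_not_lt hlt heq) hhead] at hfound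
        cases hfound

-- B's delete mutation on a found key is pvRemove
theorem pvLocate_del (store : List ((String × String) × String)) (kf : String × String)
    (w : String) (hs : pvSorted store) (hfound : pvLook store kf = some w) :
    store.eraseIdx (pvLocate store kf).1 = pvRemove kf store := by
  induction store with
  | nil => cases hfound
  | cons e rest ih =>
    rcases List.pairwise_cons.1 hs with ⟨hhead, hrest⟩
    simp only [pvLook] at hfound
    simp only [pvLocate, pvRemove]
    by_cases hlt : pvKfLt e.1 kf = true
    · have hne : e.1 ≠ kf := fun h => pvOrd_irrefl _ _ ((pvKfLt_iff _ _).1 hlt) h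
      rw [if_neg hne] at hfound
      simp only [hlt, if_true, List.eraseIdx_cons_succ]
      rw [ih hrest hfound]
    · simp only [hlt, Bool.false_eq_true, if_false]
      by_cases heq : e.1 = kf
      · simp [heq]
      · rw [if_neg heq] at hfound
        rw [pvLook_eq_none_of_lt (pvOrd_of_not_lt hlt heq) hhead] at hfound
        cases hfound

theorem pvMem_upsert {x : (String × String) × String} {kf : String × String} {v : String}
    {store : List ((String × String) × String)} (h : x ∈ pvUpsert kf v store) :
    x = (kf, v) ∨ x ∈ store := by
  induction store with
  | nil => simpa [pvUpsert] using h
  | cons e rest ih =>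
    simp only [pvUpsert] at h
    by_cases hlt : pvKfLt e.1 kf = true
    · simp only [hlt, if_true, List.mem_cons] at h
      rcases h with h | h
      · exact Or.inr (by simp [h])
      · rcases ih h with h | h
        · exact Or.inl h
        · exact Or.inr (by simp [h])
    · simp only [hlt, Bool.false_eq_true, if_false] at h
      by_cases heq : (e.1 == kf) = true
      · simp only [heq, if_true, List.mem_cons] at h
        rcases h with h | h
        · exact Or.inl h
        · exact Or.inr (by simp [h])
      · simp only [heq, Bool.false_eq_true, if_false, List.mem_cons] at h
        rcases h with h | h | h
        · exact Or.inl h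
        · exact Or.inr (by simp [h])
        · exact Or.inr (by simp [h])

theorem pvSorted_upsert (kf : String × String) (v : String)
    (store : List ((String × String) × String)) (hs : pvSorted store) :
    pvSorted (pvUpsert kf v store) := by
  induction store with
  | nil => simp [pvUpsert, pvSorted]
  | cons e rest ih =>
    rcases List.pairwise_cons.1 hs with ⟨hhead, hrest⟩
    simp only [pvUpsert]
    by_cases hlt : pvKfLt e.1 kf = true
    · simp only [hlt, if_true]
      refine List.pairwise_cons.2 ⟨?_, ih hrest⟩
      intro x hx
      rcases pvMem_upsert hx with rfl | hx
      · exact (pvKfLt_iff _ _).1 hlt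
      · exact hhead x hx
    · simp only [hlt, Bool.false_eq_true, if_false]
      by_cases heq : e.1 = kf
      · simp only [heq, beq_self_eq_true, if_true]
        refine List.pairwise_cons.2 ⟨?_, hrest⟩
        intro x hx
        exact heq ▸ hhead x hx
      · have hbe : (e.1 == kf) = false := by simp [heq]
        have hkfe : pvOrd kf e.1 := pvOrd_of_not_lt hlt heq
        simp only [hbe, Bool.false_eq_true, if_false]
        refine List.pairwise_cons.2 ⟨?_, hs⟩
        intro x hx
        rcases List.mem_cons.1 hx with rfl | hx
        · exact hkfe
        · exact pvOrd_trans hkfe (hhead x hx)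

theorem pvRemove_sublist (kf : String × String) (store : List ((String × String) × String)) :
    (pvRemove kf store).Sublist store := by
  induction store with
  | nil => simp [pvRemove]
  | cons e rest ih =>
    simp only [pvRemove]
    by_cases hlt : pvKfLt e.1 kf = true
    · simp only [hlt, if_true]
      exact List.Sublist.cons₂ e ih
    · simp only [hlt, Bool.false_eq_true, if_false]
      by_cases heq : (e.1 == kf) = true
      · simp only [heq, if_true]
        exact List.sublist_cons_self e rest
      · simp [heq]

theorem pvSorted_remove (kf : String × String) (store : List ((String × String) × String))
    (hs : pvSorted store) : pvSorted (pvRemove kf store) :=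
  hs.sublist (pvRemove_sublist kf store)

theorem pvLook_upsert (kf kf' : String × String) (v : String)
    (store : List ((String × String) × String)) :
    pvLook (pvUpsert kf v store) kf' = if kf' = kf then some v else pvLook store kf' := by
  induction store with
  | nil =>
    simp only [pvUpsert, pvLook]
    by_cases h : kf' = kf
    · simp [h]
    · have h' : ¬ (kf = kf') := fun hh => h hh.symm
      simp [h, h']
  | cons e rest ih =>
    simp only [pvUpsert]
    by_cases hlt : pvKfLt e.1 kf = true
    · have hne : e.1 ≠ kf := fun h => pvOrd_irrefl _ _ ((pvKfLt_iff _ _).1 hlt) h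
      simp only [hlt, if_true, pvLook]
      by_cases he : e.1 = kf'
      · have : ¬ (kf' = kf) := fun h => hne (he.trans h)
        simp [he, this]
      · simp [he, ih]
    · simp only [hlt, Bool.false_eq_true, if_false]
      by_cases heq : e.1 = kf
      · simp only [heq, beq_self_eq_true, if_true, pvLook]
        by_cases h : kf' = kf
        · simp [h]
        · have h' : ¬ (kf = kf') := fun hh => h hh.symm
          simp [h, h']
      · have hbe : (e.1 == kf) = false := by simp [heq]
        simp only [hbe, Bool.false_eq_true, if_false, pvLook]
        by_cases h : kf' = kf
        · simp [h]
        · have h' : ¬ (kf = kf') := fun hh => h hh.symm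
          simp [h, h']

theorem pvLook_remove (kf kf' : String × String)
    (store : List ((String × String) × String)) (hs : pvSorted store) :
    pvLook (pvRemove kf store) kf' = if kf' = kf then none else pvLook store kf' := by
  induction store with
  | nil => simp [pvRemove, pvLook]
  | cons e rest ih =>
    rcases List.pairwise_cons.1 hs with ⟨hhead, hrest⟩
    simp only [pvRemove]
    by_cases hlt : pvKfLt e.1 kf = true
    · have hne : e.1 ≠ kf := fun h => pvOrd_irrefl _ _ ((pvKfLt_iff _ _).1 hlt) h
      simp only [hlt, if_true, pvLook]
      by_cases he : e.1 = kf'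
      · have : ¬ (kf' = kf) := fun h => hne (he.trans h)
        simp [he, this]
      · simp [he, ih hrest]
    · simp only [hlt, Bool.false_eq_true, if_false]
      by_cases heq : e.1 = kf
      · simp only [heq, beq_self_eq_true, if_true]
        by_cases h : kf' = kf
        · subst h
          rw [if_pos rfl]
          apply pvLook_eq_none_of_forall
          intro x hx hxe
          exact pvOrd_irrefl _ _ (heq ▸ hhead x hx) hxe.symm
        · rw [if_neg h, pvLook, if_neg (fun hh : e.1 = kf' => h (hh.symm.trans heq))]
      · have hbe : (e.1 == kf) = false := by simp [heq]
        simp only [hbe, Bool.false_eq_true, if_false, pvLook]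
        by_cases he : e.1 = kf'
        · have : ¬ (kf' = kf) := fun h => heq (he.trans h)
          simp [he, this]
        · by_cases h : kf' = kf
          · subst h
            rw [if_pos rfl, if_neg he]
            exact pvLook_eq_none_of_lt (pvOrd_of_not_lt hlt heq) hhead
          · simp [he, h]

-- membership ↔ lookup on a sorted store
theorem pvLook_eq_some_iff_mem (store : List ((String × String) × String))
    (kf : String × String) (v : String) (hs : pvSorted store) :
    pvLook store kf = some v ↔ (kf, v) ∈ store := by
  induction store with
  | nil => simp [pvLook]
  | cons e rest ih =>
    rcases List.pairwise_cons.1 hs with ⟨hhead, hrest⟩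
    simp only [pvLook, List.mem_cons]
    by_cases he : e.1 = kf
    · rw [if_pos he]
      constructor
      · rintro h
        cases h
        exact Or.inl (by rw [← he])
      · rintro (h | h)
        · rw [← h]
        · exfalso
          have hlook : pvLook rest kf = none :=
            pvLook_eq_none_of_forall rest kf
              (fun x hx hxe => pvOrd_irrefl _ _ (he ▸ hhead x hx) hxe.symm)
          rw [(ih hrest).2 h] at hlook
          cases hlook
    · rw [if_neg he, ih hrest]
      constructor
      · exact Or.inr
      · rintro (h | h)
        · exact absurd (congrArg Prod.fst h).symm he
        · exact h

-- ===== the simulation invariant between A's nested db and B's sorted flat store =====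
def pvInv (db : PySem.Dict String (PySem.Dict String String))
    (st : List ((String × String) × String)) : Prop :=
  db.keys.Nodup ∧ (∀ k inn, db.get? k = some inn → inn.keys.Nodup) ∧
  pvSorted st ∧
  (∀ k f, ((db.get? k).bind (fun inn => inn.get? f)) = pvLook st (k, f))

theorem pvGet?_erase {κ ν : Type} [BEq κ] [LawfulBEq κ] [DecidableEq κ] (d : PySem.Dict κ ν) (j x : κ) :
    (d.erase j).get? x = if x = j then none else d.get? x := by
  rcases d with ⟨l⟩
  simp only [PySem.Dict.erase, PySem.Dict.get?, List.find?_filter]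
  by_cases hx : x = j
  · subst hx
    rw [if_pos rfl]
    have : List.find? (fun a : κ × ν => decide ((!a.1 == x) = true ∧ (a.1 == x) = true)) l = none := by
      rw [List.find?_eq_none]
      intro a _
      by_cases h : a.1 = x <;> simp [h]
    rw [this]
    rfl
  · rw [if_neg hx]
    have : (fun a : κ × ν => decide ((!a.1 == j) = true ∧ (a.1 == x) = true))
        = (fun a : κ × ν => a.1 == x) := by
      funext a
      by_cases h : a.1 = x
      · simp [h, hx]
      · simp [h]
    rw [this]

theorem pvNodup_keys_erase {κ ν : Type} [BEq κ] (d : PySem.Dict κ ν) (j : κ)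
    (h : d.keys.Nodup) : (d.erase j).keys.Nodup := by
  have hs : (d.erase j).items.Sublist d.items := List.filter_sublist
  exact List.Nodup.sublist (hs.map Prod.fst) h

theorem pvInner_nodup {db : PySem.Dict String (PySem.Dict String String)}
    (h3 : ∀ k inn, db.get? k = some inn → inn.keys.Nodup) (k : String) :
    (db.getD k PySem.Dict.empty).keys.Nodup := by
  rw [PySem.Dict.getD_eq_get?_getD]
  cases hk : db.get? k with
  | none => exact PySem.Dict.nodup_keys_empty
  | some inn => exact h3 k inn hk

theorem pvInner_get? {db : PySem.Dict String (PySem.Dict String String)}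
    {st : List ((String × String) × String)}
    (h4 : ∀ k f, ((db.get? k).bind (fun inn => inn.get? f)) = pvLook st (k, f)) (k f : String) :
    (db.getD k PySem.Dict.empty).get? f = pvLook st (k, f) := by
  rw [← h4 k f, PySem.Dict.getD_eq_get?_getD]
  cases hk : db.get? k with
  | none => simp [PySem.Dict.get?_empty]
  | some inn => simp

theorem pvInv_insert {db : PySem.Dict String (PySem.Dict String String)}
    {st : List ((String × String) × String)} (h : pvInv db st) (k f v : String) :
    pvInv (db.insert k ((db.getD k PySem.Dict.empty).insert f v)) (pvUpsert (k, f) v st) := by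
  obtain ⟨h1, h3, hsort, h4⟩ := h
  refine ⟨PySem.Dict.nodup_keys_insert _ _ _ h1, ?_, pvSorted_upsert _ _ _ hsort, ?_⟩
  · intro k' inn' hk'
    rw [PySem.Dict.get?_insert] at hk'
    by_cases hkk : k' = k
    · rw [if_pos hkk] at hk'
      cases hk'
      exact PySem.Dict.nodup_keys_insert _ _ _ (pvInner_nodup h3 k)
    · rw [if_neg hkk] at hk'
      exact h3 k' inn' hk'
  · intro k' f'
    rw [PySem.Dict.get?_insert, pvLook_upsert]
    by_cases hkk : k' = k
    · subst hkk
      rw [if_pos rfl]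
      simp only [Option.bind_some]
      rw [PySem.Dict.get?_insert]
      by_cases hff : f' = f
      · subst hff; simp
      · rw [if_neg hff, if_neg (by simp [hff]), pvInner_get? h4]
    · rw [if_neg hkk, if_neg (by simp [hkk]), h4]

theorem pvInv_erase {db : PySem.Dict String (PySem.Dict String String)}
    {st : List ((String × String) × String)} (h : pvInv db st) (k f : String) :
    pvInv (db.insert k ((db.getD k PySem.Dict.empty).erase f)) (pvRemove (k, f) st) := by
  obtain ⟨h1, h3, hsort, h4⟩ := h
  refine ⟨PySem.Dict.nodup_keys_insert _ _ _ h1, ?_, pvSorted_remove _ _ hsort, ?_⟩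
  · intro k' inn' hk'
    rw [PySem.Dict.get?_insert] at hk'
    by_cases hkk : k' = k
    · rw [if_pos hkk] at hk'
      cases hk'
      exact pvNodup_keys_erase _ _ (pvInner_nodup h3 k)
    · rw [if_neg hkk] at hk'
      exact h3 k' inn' hk'
  · intro k' f'
    rw [PySem.Dict.get?_insert, pvLook_remove _ _ _ hsort]
    by_cases hkk : k' = k
    · subst hkk
      rw [if_pos rfl]
      simp only [Option.bind_some]
      rw [pvGet?_erase]
      by_cases hff : f' = f
      · subst hff; simp
      · rw [if_neg hff, if_neg (by simp [hff]), pvInner_get? h4]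
    · rw [if_neg hkk, if_neg (by simp [hkk]), h4]

theorem pvInv_empty : pvInv PySem.Dict.empty [] := by
  refine ⟨PySem.Dict.nodup_keys_empty, ?_, by simp [pvSorted], ?_⟩
  · intro k inn hk
    rw [PySem.Dict.get?_empty] at hk
    cases hk
  · intro k f
    simp [PySem.Dict.get?_empty, pvLook]

-- ===== SCAN correctness: sorted2 of the inner items = filter of the sorted store =====
theorem pvInsertBy_congr {α : Type} (f g : α → α → Bool) (x : α) (l : List α)
    (h : ∀ y ∈ l, f x y = g x y) : PySem.List.insertBy f x l = PySem.List.insertBy g x l := by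
  induction l with
  | nil => rfl
  | cons y ys ih =>
    simp only [PySem.List.insertBy]
    rw [h y (by simp)]
    by_cases hg : g x y = true
    · simp [hg]
    · simp [hg]
      exact ih (fun z hz => h z (by simp [hz]))

theorem pvFoldl_insertBy_congr {α : Type} (f g : α → α → Bool) (xs : List α) :
    ∀ acc : List α, (∀ a b, a ∈ xs → (b ∈ xs ∨ b ∈ acc) → f a b = g a b) →
    xs.foldl (fun acc x => PySem.List.insertBy f x acc) acc
      = xs.foldl (fun acc x => PySem.List.insertBy g x acc) acc := by
  induction xs with
  | nil => intro acc _; rfl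
  | cons x t ih =>
    intro acc h
    simp only [List.foldl_cons]
    rw [pvInsertBy_congr f g x acc (fun y hy => h x y (by simp) (Or.inr hy))]
    apply ih
    intro a b ha hb
    refine h a b (by simp [ha]) ?_
    rcases hb with hb | hb
    · exact Or.inl (by simp [hb])
    · rcases (PySem.List.mem_insertBy g x b acc).1 hb with rfl | hb
      · exact Or.inl (by simp)
      · exact Or.inr hb

theorem pvSorted2_eq_sorted (xs : List (String × String)) (hnd : (xs.map Prod.fst).Nodup) :
    PySem.List.sorted2 xs Prod.fst Prod.snd = PySem.List.sorted xs Prod.fst := by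
  have hinj := List.inj_on_of_nodup_map hnd
  simp only [PySem.List.sorted2, PySem.List.sorted, if_neg (by decide : ¬ (false = true))]
  apply pvFoldl_insertBy_congr
  intro a b ha hb
  have hb' : b ∈ xs := by tauto
  by_cases hfst : a.1 = b.1
  · have : a = b := hinj ha hb' hfst
    subst this
    simp
  · rcases lt_or_gt_of_ne hfst with hlt | hgt
    · simp [hlt]
    · simp [hgt, not_lt_of_gt hgt]

-- the filtered sorted store IS sorted(inner.items.filter pred) — the heart of SCAN equivalence
theorem pvScanEq (db : PySem.Dict String (PySem.Dict String String))
    (st : List ((String × String) × String)) (h : pvInv db st) (key : String)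
    (sel : String → Bool) :
    PySem.List.sorted2 ((db.getD key PySem.Dict.empty).items.filter (fun p => sel p.1))
        Prod.fst Prod.snd
      = (st.filter (fun e => e.1.1 == key && sel e.1.2)).map (fun e => (e.1.2, e.2)) := by
  obtain ⟨h1, h3, hsort, h4⟩ := h
  have hik : ((db.getD key PySem.Dict.empty).items.map Prod.fst).Nodup := pvInner_nodup h3 key
  have hndf : (((db.getD key PySem.Dict.empty).items.filter (fun p => sel p.1)).map Prod.fst).Nodup :=
    List.Nodup.sublist (List.filter_sublist.map Prod.fst) hik
  rw [pvSorted2_eq_sorted _ hndf]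
  have hfsorted : pvSorted (st.filter (fun e => e.1.1 == key && sel e.1.2)) :=
    hsort.sublist List.filter_sublist
  have hfnd : (st.filter (fun e => e.1.1 == key && sel e.1.2)).Nodup :=
    hfsorted.imp (fun h he => pvOrd_irrefl _ _ h (congrArg Prod.fst he))
  apply PySem.List.sorted_eq_of_perm_of_pairwise_lt
  · -- permutation: both sides carry exactly the (field, value) pairs of inner under sel
    have hii : (db.getD key PySem.Dict.empty).items.Nodup := hik.of_map
    have hndR : ((db.getD key PySem.Dict.empty).items.filter (fun p => sel p.1)).Nodup := hii.filter _
    have hndL : ((st.filter (fun e => e.1.1 == key && sel e.1.2)).map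
        (fun e => (e.1.2, e.2))).Nodup := by
      refine List.Nodup.map_on ?_ hfnd
      rintro ⟨⟨xk, xf⟩, xv⟩ hx ⟨⟨yk, yf⟩, yv⟩ hy hxy
      have hxc := (List.mem_filter.1 hx).2
      have hyc := (List.mem_filter.1 hy).2
      simp only [Bool.and_eq_true, beq_iff_eq] at hxc hyc
      simp only [Prod.mk.injEq] at hxy
      simp [hxc.1, hyc.1, hxy.1, hxy.2]
    rw [List.perm_ext_iff_of_nodup hndL hndR]
    rintro ⟨f, v⟩
    simp only [List.mem_map, List.mem_filter]
    constructor
    · rintro ⟨⟨⟨pk, pf⟩, pv⟩, ⟨hpmem, hpcond⟩, hpeq⟩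
      simp only [Bool.and_eq_true, beq_iff_eq] at hpcond
      simp only [Prod.mk.injEq] at hpeq
      obtain ⟨rfl, hsel⟩ := hpcond
      obtain ⟨rfl, rfl⟩ := hpeq
      have hlook : pvLook st (pk, pf) = some pv :=
        (pvLook_eq_some_iff_mem st _ _ hsort).2 hpmem
      have hin : (db.getD pk PySem.Dict.empty).get? pf = some pv := by
        rw [pvInner_get? h4]; exact hlook
      exact ⟨(PySem.Dict.get?_eq_some_iff_mem_items _ _ _ hik).1 hin, hsel⟩
    · rintro ⟨hmem, hsel⟩
      have hin : (db.getD key PySem.Dict.empty).get? f = some v :=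
        (PySem.Dict.get?_eq_some_iff_mem_items _ _ _ hik).2 hmem
      have hlook : pvLook st (key, f) = some v := by
        rw [← pvInner_get? h4]; exact hin
      exact ⟨((key, f), v),
        ⟨(pvLook_eq_some_iff_mem st _ _ hsort).1 hlook, by simp [hsel]⟩, rfl⟩
  · -- strictly increasing field names once the key component is fixed
    rw [List.pairwise_map]
    refine List.Pairwise.imp_of_mem ?_ hfsorted
    intro a b ha hb hab
    have hac := (List.mem_filter.1 ha).2
    have hbc := (List.mem_filter.1 hb).2
    simp only [Bool.and_eq_true, beq_iff_eq] at hac hbc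
    rcases hab with hlt | ⟨_, hlt⟩
    · rw [hac.1, hbc.1] at hlt
      exact absurd hlt (lt_irrefl _)
    · exact hlt

-- pvRender is the join of the (field, value) pairs it filters out
theorem pvRender_eq (st : List ((String × String) × String)) (key : String)
    (sel : String → Bool) :
    pvRender st key sel
      = pvJoinFields ((st.filter (fun e => e.1.1 == key && sel e.1.2)).map
          (fun e => (e.1.2, e.2))) := by
  simp only [pvRender, pvJoinFields, List.map_map]
  rfl

-- A's empty-guard: if the key is absent or its inner dict empty, nothing of st has that key
theorem pvGuard_filter_nil (db : PySem.Dict String (PySem.Dict String String))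
    (st : List ((String × String) × String)) (h : pvInv db st) (key : String)
    (sel : String → Bool)
    (hg : (!db.contains key || (db.getD key PySem.Dict.empty).items.isEmpty) = true) :
    st.filter (fun e => e.1.1 == key && sel e.1.2) = [] := by
  obtain ⟨h1, h3, hsort, h4⟩ := h
  have hempty : (db.getD key PySem.Dict.empty).items = [] := by
    simp only [Bool.or_eq_true] at hg
    rcases hg with hnc | hie
    · cases hget : db.get? key with
      | none => rw [PySem.Dict.getD_eq_get?_getD, hget]; rfl
      | some inn =>
        exfalso
        have hcon := PySem.Dict.contains_eq_isSome_get? db key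
        rw [hget] at hcon
        simp [hcon] at hnc
    · exact List.isEmpty_iff.1 hie
  rw [List.filter_eq_nil_iff]
  rintro ⟨⟨ek, ef⟩, ev⟩ hmem
  intro hcond
  simp only [Bool.and_eq_true, beq_iff_eq] at hcond
  have hlook : pvLook st (ek, ef) = some ev := (pvLook_eq_some_iff_mem st _ _ hsort).2 hmem
  rw [← pvInner_get? h4] at hlook
  rw [hcond.1] at hlook
  rcases PySem.Dict.get?_eq_some_iff_mem_items _ _ _ (pvInner_nodup h3 key) |>.1 hlook with hmem'
  rw [hempty] at hmem'
  cases hmem'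

-- one SCAN answer, covering both the guard and the sorted case
theorem pvScan_out (db : PySem.Dict String (PySem.Dict String String))
    (st : List ((String × String) × String)) (h : pvInv db st) (key : String)
    (sel : String → Bool) :
    (if (!db.contains key || (db.getD key PySem.Dict.empty).items.isEmpty) = true then ""
     else pvJoinFields (PySem.List.sorted2
            ((db.getD key PySem.Dict.empty).items.filter (fun p => sel p.1)) Prod.fst Prod.snd))
      = pvRender st key sel := by
  rw [pvRender_eq]
  by_cases hg : (!db.contains key || (db.getD key PySem.Dict.empty).items.isEmpty) = true
  · rw [if_pos hg, pvGuard_filter_nil db st h key sel hg]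
    rfl
  · rw [if_neg hg, pvScanEq db st h key sel]

-- B's found/value test equals a lookup test, on a sorted store
theorem pvCond_eq (st : List ((String × String) × String)) (kf : String × String)
    (exp : String) (hs : pvSorted st) :
    ((pvLocate st kf).2 && ((st.getD (pvLocate st kf).1 (("", ""), "")).2 == exp))
      = (pvLook st kf == some exp) := by
  have h := pvLocate_get st kf hs
  cases hr : (pvLocate st kf).2 with
  | false =>
    rw [hr] at h
    simp only [Bool.false_eq_true, if_false] at h
    simp [← h]
  | true =>
    rw [hr] at h
    simp only [if_true] at h
    rw [← h]
    simp

-- ===== the per-query simulation =====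
theorem pvStep_sim (db : PySem.Dict String (PySem.Dict String String))
    (st : List ((String × String) × String)) (q : List String) (h : pvInv db st) :
    (solutionStep db q).2 = (solutionAltStep st q).2 ∧
      pvInv (solutionStep db q).1 (solutionAltStep st q).1 := by
  obtain ⟨h1, h3, hsort, h4⟩ := h
  have hinv : pvInv db st := ⟨h1, h3, hsort, h4⟩
  simp only [solutionStep, solutionAltStep]
  set op := PySem.List.pyGetD q 0 "" with hop
  set key := PySem.List.pyGetD q 2 "" with hkey
  set params := q.drop 3 with hparams
  by_cases hS : op = "SET"
  · have e : (op == "SET") = true := by simp [hS]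
    simp only [e, reduceIte]
    refine ⟨by trivial, ?_⟩
    have hrw : ((if db.contains key = true then db else db.insert key PySem.Dict.empty).insert key
          (((if db.contains key = true then db else db.insert key PySem.Dict.empty).getD key
              PySem.Dict.empty).insert (PySem.List.pyGetD params 0 "") (PySem.List.pyGetD params 1 "")))
        = db.insert key ((db.getD key PySem.Dict.empty).insert (PySem.List.pyGetD params 0 "")
            (PySem.List.pyGetD params 1 "")) := by
      by_cases hc : db.contains key = true
      · rw [if_pos hc]
      · rw [if_neg hc, PySem.Dict.getD_insert_self,
          PySem.Dict.getD_of_not_contains db _ (by simpa using hc),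
          PySem.Dict.insert_insert_self]
    show pvInv _ _
    rw [hrw, pvLocate_set st (key, PySem.List.pyGetD params 0 "") (PySem.List.pyGetD params 1 "")]
    exact pvInv_insert hinv key _ _
  · have e : (op == "SET") = false := by simp [hS]
    simp only [e, Bool.false_eq_true, if_false]
    by_cases hCS : op = "COMPARE_AND_SET"
    · have e2 : (op == "COMPARE_AND_SET") = true := by simp [hCS]
      simp only [e2, reduceIte]
      have hval : (db.getD key PySem.Dict.empty).get? (PySem.List.pyGetD params 0 "")
          = pvLook st (key, PySem.List.pyGetD params 0 "") := pvInner_get? h4 _ _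
      have hcond := pvCond_eq st (key, PySem.List.pyGetD params 0 "")
        (PySem.List.pyGetD params 1 "") hsort
      cases hfl : pvLook st (key, PySem.List.pyGetD params 0 "") with
      | none =>
        have hcA : ((db.getD key PySem.Dict.empty).contains (PySem.List.pyGetD params 0 "")) = false := by
          rw [PySem.Dict.contains_eq_isSome_get?, hval, hfl]; rfl
        rw [hfl] at hcond
        simp only [Option.none_beq_some] at hcond  -- hcond : lhs = false
        simp only [hcA, Bool.false_and, Bool.and_false, Bool.false_eq_true, if_false, hcond]
        exact ⟨by trivial, hinv⟩
      | some v =>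
        have hcK : db.contains key = true := by
          rw [PySem.Dict.contains_eq_isSome_get?]
          rw [← hval, PySem.Dict.getD_eq_get?_getD] at hfl
          cases hdk : db.get? key with
          | none => rw [hdk] at hfl; simp [PySem.Dict.get?_empty] at hfl
          | some _ => rfl
        have hcA : ((db.getD key PySem.Dict.empty).contains (PySem.List.pyGetD params 0 "")) = true := by
          rw [PySem.Dict.contains_eq_isSome_get?, hval, hfl]; rfl
        have hgA : (db.getD key PySem.Dict.empty).getD (PySem.List.pyGetD params 0 "") "" = v := by
          rw [PySem.Dict.getD_eq_get?_getD, hval, hfl]; rfl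
        rw [hfl] at hcond
        simp only [hcK, hcA, hgA, Bool.true_and]
        by_cases hv : (v == PySem.List.pyGetD params 1 "") = true
        · have : (some v == some (PySem.List.pyGetD params 1 "")) = true := by
            simpa using hv
          rw [this] at hcond
          simp only [hv, hcond, if_true]
          refine ⟨by trivial, ?_⟩
          rw [pvLocate_cas st (key, PySem.List.pyGetD params 0 "")
            (PySem.List.pyGetD params 2 "") v hsort hfl]
          exact pvInv_insert hinv key _ _
        · have hv' : (v == PySem.List.pyGetD params 1 "") = false := by
            simpa using hv
          have : (some v == some (PySem.List.pyGetD params 1 "")) = false := by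
            simpa using hv'
          rw [this] at hcond
          simp only [hv', Bool.false_eq_true, if_false, hcond]
          exact ⟨by trivial, hinv⟩
    · have e2 : (op == "COMPARE_AND_SET") = false := by simp [hCS]
      simp only [e2, Bool.false_eq_true, if_false]
      by_cases hG : op = "GET"
      · have e3 : (op == "GET") = true := by simp [hG]
        simp only [e3, reduceIte]
        refine ⟨?_, hinv⟩
        have hval : (db.getD key PySem.Dict.empty).get? (PySem.List.pyGetD params 0 "")
            = pvLook st (key, PySem.List.pyGetD params 0 "") := pvInner_get? h4 _ _
        have hloc := pvLocate_get st (key, PySem.List.pyGetD params 0 "") hsort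
        cases hfl : pvLook st (key, PySem.List.pyGetD params 0 "") with
        | none =>
          have hcA : ((db.getD key PySem.Dict.empty).contains (PySem.List.pyGetD params 0 "")) = false := by
            rw [PySem.Dict.contains_eq_isSome_get?, hval, hfl]; rfl
          rw [hfl] at hloc
          have hr2 : (pvLocate st (key, PySem.List.pyGetD params 0 "")).2 = false := by
            cases hr : (pvLocate st (key, PySem.List.pyGetD params 0 "")).2 with
            | false => rfl
            | true => rw [hr] at hloc; simp at hloc
          simp [hcA, hr2]
        | some v =>
          have hcK : db.contains key = true := by
            rw [PySem.Dict.contains_eq_isSome_get?]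
            rw [← hval, PySem.Dict.getD_eq_get?_getD] at hfl
            cases hdk : db.get? key with
            | none => rw [hdk] at hfl; simp [PySem.Dict.get?_empty] at hfl
            | some _ => rfl
          have hcA : ((db.getD key PySem.Dict.empty).contains (PySem.List.pyGetD params 0 "")) = true := by
            rw [PySem.Dict.contains_eq_isSome_get?, hval, hfl]; rfl
          have hgA : (db.getD key PySem.Dict.empty).getD (PySem.List.pyGetD params 0 "") "" = v := by
            rw [PySem.Dict.getD_eq_get?_getD, hval, hfl]; rfl
          rw [hfl] at hloc
          have hr2 : (pvLocate st (key, PySem.List.pyGetD params 0 "")).2 = true := by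
            cases hr : (pvLocate st (key, PySem.List.pyGetD params 0 "")).2 with
            | true => rfl
            | false => rw [hr] at hloc; simp at hloc
          rw [hr2] at hloc
          simp only [if_true] at hloc
          have hg2 : (st.getD (pvLocate st (key, PySem.List.pyGetD params 0 "")).1 (("", ""), "")).2 = v := by
            exact Option.some.inj hloc
          rw [List.getD_eq_getElem?_getD] at hg2
          simp [hcK, hcA, hgA, hr2, hg2]
      · have e3 : (op == "GET") = false := by simp [hG]
        simp only [e3, Bool.false_eq_true, if_false]
        by_cases hCD : op = "COMPARE_AND_DELETE"
        · have e4 : (op == "COMPARE_AND_DELETE") = true := by simp [hCD]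
          simp only [e4, reduceIte]
          have hval : (db.getD key PySem.Dict.empty).get? (PySem.List.pyGetD params 0 "")
              = pvLook st (key, PySem.List.pyGetD params 0 "") := pvInner_get? h4 _ _
          have hcond := pvCond_eq st (key, PySem.List.pyGetD params 0 "")
            (PySem.List.pyGetD params 1 "") hsort
          cases hfl : pvLook st (key, PySem.List.pyGetD params 0 "") with
          | none =>
            have hcA : ((db.getD key PySem.Dict.empty).contains (PySem.List.pyGetD params 0 "")) = false := by
              rw [PySem.Dict.contains_eq_isSome_get?, hval, hfl]; rfl
            rw [hfl] at hcond
            simp only [Option.none_beq_some] at hcond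
            simp only [hcA, Bool.false_and, Bool.and_false, Bool.false_eq_true, if_false, hcond]
            exact ⟨by trivial, hinv⟩
          | some v =>
            have hcK : db.contains key = true := by
              rw [PySem.Dict.contains_eq_isSome_get?]
              rw [← hval, PySem.Dict.getD_eq_get?_getD] at hfl
              cases hdk : db.get? key with
              | none => rw [hdk] at hfl; simp [PySem.Dict.get?_empty] at hfl
              | some _ => rfl
            have hcA : ((db.getD key PySem.Dict.empty).contains (PySem.List.pyGetD params 0 "")) = true := by
              rw [PySem.Dict.contains_eq_isSome_get?, hval, hfl]; rfl
            have hgA : (db.getD key PySem.Dict.empty).getD (PySem.List.pyGetD params 0 "") "" = v := by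
              rw [PySem.Dict.getD_eq_get?_getD, hval, hfl]; rfl
            rw [hfl] at hcond
            simp only [hcK, hcA, hgA, Bool.true_and]
            by_cases hv : (v == PySem.List.pyGetD params 1 "") = true
            · have : (some v == some (PySem.List.pyGetD params 1 "")) = true := by simpa using hv
              rw [this] at hcond
              simp only [hv, hcond, if_true]
              refine ⟨by trivial, ?_⟩
              rw [pvLocate_del st (key, PySem.List.pyGetD params 0 "") v hsort hfl]
              exact pvInv_erase hinv key _
            · have hv' : (v == PySem.List.pyGetD params 1 "") = false := by simpa using hv
              have : (some v == some (PySem.List.pyGetD params 1 "")) = false := by simpa using hv'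
              rw [this] at hcond
              simp only [hv', Bool.false_eq_true, if_false, hcond]
              exact ⟨by trivial, hinv⟩
        · have e4 : (op == "COMPARE_AND_DELETE") = false := by simp [hCD]
          simp only [e4, Bool.false_eq_true, if_false]
          by_cases hSc : op = "SCAN"
          · have e5 : (op == "SCAN") = true := by simp [hSc]
            simp only [e5, reduceIte]
            refine ⟨?_, hinv⟩
            have := pvScan_out db st hinv key (fun _ => true)
            simp only [List.filter_true] at this
            by_cases hg : (!db.contains key || (db.getD key PySem.Dict.empty).items.isEmpty) = true
            · rw [if_pos hg] at this
              simp only [hg, if_true]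
              exact this
            · rw [if_neg hg] at this
              simp only [hg, Bool.false_eq_true, if_false]
              exact this
          · have e5 : (op == "SCAN") = false := by simp [hSc]
            simp only [e5, Bool.false_eq_true, if_false]
            by_cases hSp : op = "SCAN_BY_PREFIX"
            · have e6 : (op == "SCAN_BY_PREFIX") = true := by simp [hSp]
              simp only [e6, reduceIte]
              refine ⟨?_, hinv⟩
              have := pvScan_out db st hinv key
                (fun f => PySem.Str.startswith f (PySem.List.pyGetD params 0 ""))
              by_cases hg : (!db.contains key || (db.getD key PySem.Dict.empty).items.isEmpty) = true
              · rw [if_pos hg] at this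
                simp only [hg, if_true]
                exact this
              · rw [if_neg hg] at this
                simp only [hg, Bool.false_eq_true, if_false]
                exact this
            · have e6 : (op == "SCAN_BY_PREFIX") = false := by simp [hSp]
              simp only [e6, Bool.false_eq_true, if_false]
              exact ⟨by trivial, hinv⟩

-- A's append-to-results fold produces exactly B's cons recursion, given the invariant
theorem pvFold_sim (queries : List (List String)) :
    ∀ (db : PySem.Dict String (PySem.Dict String String))
      (st : List ((String × String) × String)) (res : List String), pvInv db st →
    (queries.foldl (fun acc q => let r := solutionStep acc.1 q; (r.1, acc.2 ++ [r.2]))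
        (db, res)).2
      = res ++ solutionAltGo st queries := by
  induction queries with
  | nil => intro db st res _; simp [solutionAltGo]
  | cons q qs ih =>
    intro db st res hinv
    have hstep := pvStep_sim db st q hinv
    simp only [List.foldl_cons, solutionAltGo]
    rw [ih (solutionStep db q).1 (solutionAltStep st q).1 _ hstep.2, hstep.1]
    simp

-- ===== VERDICT (by name: the statement is the Claim_ definition above) =====
theorem solution_spec : Claim_equal_solution := by
  intro queries hd hp
  unfold Spec_solution solution solution_alt
  rw [pvFold_sim queries PySem.Dict.empty [] [] pvInv_empty]
  rfl
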